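-- pv_equiv track=rewrite | github.com/gagagaga8/Causal-Weighted | experiments/analysis/timewindow_sensitivity.py | get_features_for_config
-- ===== SOURCE A (Python) =====
-- BASE_FEATURES = [
--     'admission_age', 'gender', 'weight', 'sofa_24hours',
--     'aki_stage', 'aki_stage_creat', 'aki_stage_uo', 'creat',
--     'uo_rt_6hr', 'uo_rt_12hr', 'uo_rt_24hr'
-- ]
--
-- TIMEPOINT_FEATURES = ['uo', 'bun', 'pot', 'ph', 'creat']
--
-- def get_features_for_config(config_name):
--     """according toConfiguration FeatureColumnTable"""
--     features = BASE_FEATURES.copy()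
--
--     if config_name == 'Baseline Only':
--         pass # onlyuse Feature
--     elif config_name == 'k1 Only':
--         features.extend([f'{f}_k1' for f in TIMEPOINT_FEATURES])
--     elif config_name == 'k2 Only':
--         features.extend([f'{f}_k2' for f in TIMEPOINT_FEATURES])
--     elif config_name == 'k3 Only':
--         features.extend([f'{f}_k3' for f in TIMEPOINT_FEATURES])
--     elif config_name == 'k1 + k2':
--         features.extend([f'{f}_k1' for f in TIMEPOINT_FEATURES])
--         features.extend([f'{f}_k2' for f in TIMEPOINT_FEATURES])
--     elif config_name == 'k2 + k3':
--         features.extend([f'{f}_k2' for f in TIMEPOINT_FEATURES])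
--         features.extend([f'{f}_k3' for f in TIMEPOINT_FEATURES])
--     elif config_name == 'k1 + k3':
--         features.extend([f'{f}_k1' for f in TIMEPOINT_FEATURES])
--         features.extend([f'{f}_k3' for f in TIMEPOINT_FEATURES])
--     elif config_name == 'Full (k1+k2+k3)':
--         features.extend([f'{f}_k1' for f in TIMEPOINT_FEATURES])
--         features.extend([f'{f}_k2' for f in TIMEPOINT_FEATURES])
--         features.extend([f'{f}_k3' for f in TIMEPOINT_FEATURES])
--
--     return features
-- ===== SOURCE B (Python) =====
-- BASE_FEATURES = [
--     'admission_age', 'gender', 'weight', 'sofa_24hours',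
--     'aki_stage', 'aki_stage_creat', 'aki_stage_uo', 'creat',
--     'uo_rt_6hr', 'uo_rt_12hr', 'uo_rt_24hr'
-- ]
--
-- TIMEPOINT_FEATURES = ['uo', 'bun', 'pot', 'ph', 'creat']
--
-- CONFIG_SUFFIXES = {
--     'Baseline Only': [],
--     'k1 Only': ['k1'],
--     'k2 Only': ['k2'],
--     'k3 Only': ['k3'],
--     'k1 + k2': ['k1', 'k2'],
--     'k2 + k3': ['k2', 'k3'],
--     'k1 + k3': ['k1', 'k3'],
--     'Full (k1+k2+k3)': ['k1', 'k2', 'k3'],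
-- }
--
-- def get_features_for_config(config_name):
--     suffixes = CONFIG_SUFFIXES.get(config_name, [])
--     return BASE_FEATURES + [f'{f}_{s}' for s in suffixes for f in TIMEPOINT_FEATURES]
-- ===== Notes on version B (the rewrite author's own statement) =====
-- stated objective: simpler
-- what changed: Replaces the 8-branch if-elif chain with a config->suffix-list table plus a single nested comprehension that appends suffixed timepoint features.
import Mathlib
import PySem

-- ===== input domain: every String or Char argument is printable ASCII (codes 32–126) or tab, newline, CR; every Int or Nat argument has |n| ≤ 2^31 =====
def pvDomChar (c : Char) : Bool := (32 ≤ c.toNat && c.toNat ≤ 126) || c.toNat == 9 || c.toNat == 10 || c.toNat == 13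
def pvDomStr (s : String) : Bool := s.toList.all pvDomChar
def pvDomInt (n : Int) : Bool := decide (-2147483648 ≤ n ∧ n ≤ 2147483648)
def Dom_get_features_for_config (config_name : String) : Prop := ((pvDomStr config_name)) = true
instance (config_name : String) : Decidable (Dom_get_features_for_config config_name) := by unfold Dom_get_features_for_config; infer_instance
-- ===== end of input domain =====

-- B replaces A's 8-branch if-elif chain by a config→suffix-list table and one nested
-- comprehension; same return values, objective: simpler.

def BASE_FEATURES : List String :=
  ["admission_age", "gender", "weight", "sofa_24hours",
   "aki_stage", "aki_stage_creat", "aki_stage_uo", "creat",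
   "uo_rt_6hr", "uo_rt_12hr", "uo_rt_24hr"]

def TIMEPOINT_FEATURES : List String := ["uo", "bun", "pot", "ph", "creat"]

-- ===== PORT A =====
def get_features_for_config (config_name : String) : List String :=
  let features := BASE_FEATURES
  if config_name = "Baseline Only" then
    features
  else if config_name = "k1 Only" then
    features ++ TIMEPOINT_FEATURES.map (fun f => f ++ "_k1")
  else if config_name = "k2 Only" then
    features ++ TIMEPOINT_FEATURES.map (fun f => f ++ "_k2")
  else if config_name = "k3 Only" then
    features ++ TIMEPOINT_FEATURES.map (fun f => f ++ "_k3")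
  else if config_name = "k1 + k2" then
    features ++ TIMEPOINT_FEATURES.map (fun f => f ++ "_k1")
             ++ TIMEPOINT_FEATURES.map (fun f => f ++ "_k2")
  else if config_name = "k2 + k3" then
    features ++ TIMEPOINT_FEATURES.map (fun f => f ++ "_k2")
             ++ TIMEPOINT_FEATURES.map (fun f => f ++ "_k3")
  else if config_name = "k1 + k3" then
    features ++ TIMEPOINT_FEATURES.map (fun f => f ++ "_k1")
             ++ TIMEPOINT_FEATURES.map (fun f => f ++ "_k3")
  else if config_name = "Full (k1+k2+k3)" then
    features ++ TIMEPOINT_FEATURES.map (fun f => f ++ "_k1")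
             ++ TIMEPOINT_FEATURES.map (fun f => f ++ "_k2")
             ++ TIMEPOINT_FEATURES.map (fun f => f ++ "_k3")
  else
    features

-- ===== PORT B =====
def CONFIG_SUFFIXES : PySem.Dict String (List String) :=
  PySem.Dict.ofList
    [("Baseline Only", []),
     ("k1 Only", ["k1"]),
     ("k2 Only", ["k2"]),
     ("k3 Only", ["k3"]),
     ("k1 + k2", ["k1", "k2"]),
     ("k2 + k3", ["k2", "k3"]),
     ("k1 + k3", ["k1", "k3"]),
     ("Full (k1+k2+k3)", ["k1", "k2", "k3"])]

def get_features_for_config_alt (config_name : String) : List String :=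
  let suffixes := CONFIG_SUFFIXES.getD config_name []
  BASE_FEATURES ++ suffixes.flatMap (fun s => TIMEPOINT_FEATURES.map (fun f => f ++ "_" ++ s))

-- ===== PRECONDITION & SPEC =====
def Spec_get_features_for_config (config_name : String) (out : List String) : Prop := out = get_features_for_config_alt config_name
instance (config_name : String) (out : List String) : Decidable (Spec_get_features_for_config config_name out) := by unfold Spec_get_features_for_config; infer_instance

-- ===== CLAIM (what is proved, stated in full; the proofs are below) =====
def Claim_equal_get_features_for_config : Prop := ∀ (config_name : String), Dom_get_features_for_config config_name → Spec_get_features_for_config config_name (get_features_for_config config_name)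

-- ===== LEMMAS AND PROOFS =====

-- ===== VERDICT (by name: the statement is the Claim_ definition above) =====
theorem get_features_for_config_spec : Claim_equal_get_features_for_config := by
  intro config_name _
  unfold Spec_get_features_for_config get_features_for_config get_features_for_config_alt
  by_cases h1 : config_name = "Baseline Only"
  · subst h1; decide
  by_cases h2 : config_name = "k1 Only"
  · subst h2; decide
  by_cases h3 : config_name = "k2 Only"
  · subst h3; decide
  by_cases h4 : config_name = "k3 Only"
  · subst h4; decide
  by_cases h5 : config_name = "k1 + k2"
  · subst h5; decide
  by_cases h6 : config_name = "k2 + k3"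
  · subst h6; decide
  by_cases h7 : config_name = "k1 + k3"
  · subst h7; decide
  by_cases h8 : config_name = "Full (k1+k2+k3)"
  · subst h8; decide
  · have hd : CONFIG_SUFFIXES.items =
        [("Baseline Only", []), ("k1 Only", ["k1"]), ("k2 Only", ["k2"]), ("k3 Only", ["k3"]),
         ("k1 + k2", ["k1", "k2"]), ("k2 + k3", ["k2", "k3"]), ("k1 + k3", ["k1", "k3"]),
         ("Full (k1+k2+k3)", ["k1", "k2", "k3"])] := by decide
    have e1 : ("Baseline Only" == config_name) = false := by simp [Ne.symm h1]
    have e2 : ("k1 Only" == config_name) = false := by simp [Ne.symm h2]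
    have e3 : ("k2 Only" == config_name) = false := by simp [Ne.symm h3]
    have e4 : ("k3 Only" == config_name) = false := by simp [Ne.symm h4]
    have e5 : ("k1 + k2" == config_name) = false := by simp [Ne.symm h5]
    have e6 : ("k2 + k3" == config_name) = false := by simp [Ne.symm h6]
    have e7 : ("k1 + k3" == config_name) = false := by simp [Ne.symm h7]
    have e8 : ("Full (k1+k2+k3)" == config_name) = false := by simp [Ne.symm h8]
    simp [h1, h2, h3, h4, h5, h6, h7, h8, PySem.Dict.getD, PySem.Dict.get?, hd,
      List.find?, e1, e2, e3, e4, e5, e6, e7, e8]
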